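-- pv_equiv track=rewrite | github.com/rrkcl7733/TIL | baekjoon/브론즈/브론즈2/10193_Word Swap.py | costToSwap
-- ===== SOURCE A (Python) =====
-- def costToSwap(word1, word2):
--     total = 0
--     for c1, c2 in zip(word1, word2):
--         diff = abs(ord(c1) - ord(c2))
--         if c1 < c2:
--             total -= diff
--         elif c1 > c2:
--             total += diff
--
--     return total
-- ===== SOURCE B (Python) =====
-- def costToSwap(word1, word2):
--     n = min(len(word1), len(word2))
--     return sum(ord(c) for c in word1[:n]) - sum(ord(c) for c in word2[:n])
-- ===== Notes on version B (the rewrite author's own statement) =====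
-- stated objective: simpler
-- what changed: Replaces the interleaved branchy pass over zipped pairs (abs diff, sign chosen by comparison) with two independent unconditional sums of char codes over the common prefixes, subtracted once at the end.
import Mathlib
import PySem

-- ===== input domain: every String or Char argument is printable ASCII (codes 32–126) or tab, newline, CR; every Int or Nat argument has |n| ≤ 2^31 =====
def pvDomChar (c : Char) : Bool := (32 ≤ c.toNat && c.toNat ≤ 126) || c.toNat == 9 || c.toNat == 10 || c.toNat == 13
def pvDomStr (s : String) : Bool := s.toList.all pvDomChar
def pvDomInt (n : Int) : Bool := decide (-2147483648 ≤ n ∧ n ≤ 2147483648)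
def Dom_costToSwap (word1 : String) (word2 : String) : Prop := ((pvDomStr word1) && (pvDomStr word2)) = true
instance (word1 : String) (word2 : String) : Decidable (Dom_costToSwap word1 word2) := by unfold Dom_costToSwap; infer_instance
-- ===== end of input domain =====

-- B replaces A's interleaved branchy pass over zipped pairs with two independent
-- unconditional sums of char codes over the common prefixes, subtracted at the end (objective: simpler).

-- ===== PORT A =====
-- one step of A's loop body: diff = abs(ord c1 - ord c2); signed accumulation by comparison
def costToSwapStep (total : Int) (p : Char × Char) : Int :=
  let diff : Int := |(p.1.toNat : Int) - (p.2.toNat : Int)|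
  if p.1 < p.2 then total - diff
  else if p.2 < p.1 then total + diff
  else total

def costToSwap (word1 : String) (word2 : String) : Int :=
  (word1.toList.zip word2.toList).foldl costToSwapStep 0

-- ===== PORT B =====
def ordSum (l : List Char) : Int := (l.map (fun c => (c.toNat : Int))).sum

def costToSwap_alt (word1 : String) (word2 : String) : Int :=
  let n := min word1.toList.length word2.toList.length
  ordSum (word1.toList.take n) - ordSum (word2.toList.take n)

-- ===== PRECONDITION & SPEC =====
def Spec_costToSwap (word1 : String) (word2 : String) (out : Int) : Prop := out = costToSwap_alt word1 word2
instance (word1 : String) (word2 : String) (out : Int) : Decidable (Spec_costToSwap word1 word2 out) := by unfold Spec_costToSwap; infer_instance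

-- ===== CLAIM (what is proved, stated in full; the proofs are below) =====
def Claim_equal_costToSwap : Prop := ∀ (word1 : String) (word2 : String), Dom_costToSwap word1 word2 → Spec_costToSwap word1 word2 (costToSwap word1 word2)

-- ===== LEMMAS AND PROOFS =====
theorem char_lt_iff (a b : Char) : a < b ↔ a.toNat < b.toNat := by
  rw [Char.lt_def, UInt32.lt_iff_toNat_lt]; exact Iff.rfl

theorem costToSwapStep_eq (t : Int) (p : Char × Char) :
    costToSwapStep t p = t + (p.1.toNat : Int) - (p.2.toNat : Int) := by
  unfold costToSwapStep
  simp only [char_lt_iff]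
  split_ifs with h1 h3
  · rw [abs_of_neg (by omega)]; ring
  · rw [abs_of_pos (by omega)]; ring
  · omega

theorem foldl_zip_eq (l1 l2 : List Char) (t : Int) :
    (l1.zip l2).foldl costToSwapStep t =
      t + ordSum (l1.take (min l1.length l2.length)) - ordSum (l2.take (min l1.length l2.length)) := by
  induction l1 generalizing l2 t with
  | nil => simp [ordSum]
  | cons c1 l1 ih =>
    cases l2 with
    | nil => simp [ordSum]
    | cons c2 l2 =>
      simp only [List.zip_cons_cons, List.foldl_cons, List.length_cons,
        Nat.succ_min_succ, List.take_succ_cons, costToSwapStep_eq]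
      rw [ih]
      simp [ordSum]
      ring

-- ===== VERDICT (by name: the statement is the Claim_ definition above) =====
theorem costToSwap_spec : Claim_equal_costToSwap := by
  intro w1 w2 _
  unfold Spec_costToSwap costToSwap costToSwap_alt
  rw [foldl_zip_eq]
  ring
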